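-- pv_equiv track=rewrite | github.com/Anirill/MADE_test | MADE_C.py | math_tree
-- ===== SOURCE A (Python) =====
-- def math_tree(basetree, ki):
--     sum = 0
--     tree = []
--     tree.append([1 << (ki - 1)])
--     for i in range(1, ki):
--         row = []
--         for j in range(i + 1):
--             if (j == 0 or j == i):
--                 row.append(int((tree[i - 1][0] // 2)))
--             else:
--                 row.append(int((tree[i - 1][j - 1] + tree[i - 1][j]) // 2))
--         tree.append(row)
--     for i in range(0, ki):
--         for j in range(0, (i+1)):
--             sum += (basetree[i][j] * tree[i][j])
--     return sum
--
-- tree = []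
--
-- row = []
-- ===== SOURCE B (Python) =====
-- def math_tree(basetree, ki):
--     # Single pass, no Pascal table: weight of cell (i, j) is C(i, j) * 2^(ki-1-i),
--     # with the binomial coefficient maintained multiplicatively along the row.
--     total = 0
--     base = 1 << (ki - 1)
--     for i in range(ki):
--         w = base >> i
--         c = 1
--         for j in range(i + 1):
--             total += basetree[i][j] * c * w
--             c = c * (i - j) // (j + 1)
--     return total
-- ===== Notes on version B (the rewrite author's own statement) =====
-- stated objective: simpler
-- what changed: Replaces the stored Pascal-halving table with a single nested pass that maintains the binomial coefficient multiplicatively and computes the power-of-two factor by shifting, so no tree list is ever built.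
import Mathlib
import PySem

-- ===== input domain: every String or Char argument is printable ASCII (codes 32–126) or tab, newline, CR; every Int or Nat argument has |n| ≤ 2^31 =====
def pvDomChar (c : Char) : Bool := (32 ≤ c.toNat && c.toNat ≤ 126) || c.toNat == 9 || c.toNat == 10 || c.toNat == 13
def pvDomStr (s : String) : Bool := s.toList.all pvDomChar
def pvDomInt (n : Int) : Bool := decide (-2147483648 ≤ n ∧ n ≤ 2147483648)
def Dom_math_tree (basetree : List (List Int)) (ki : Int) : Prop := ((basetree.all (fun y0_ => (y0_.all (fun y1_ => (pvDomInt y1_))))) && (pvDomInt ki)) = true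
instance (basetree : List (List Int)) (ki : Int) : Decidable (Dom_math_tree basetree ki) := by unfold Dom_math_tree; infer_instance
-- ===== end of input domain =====

-- B drops A's Pascal-halving table: one nested pass with a multiplicatively maintained
-- binomial coefficient and a shifted power of two (simpler, O(1) extra space).

-- ===== PORT A =====
def math_tree (basetree : List (List Int)) (ki : Int) : Int :=
  let tree : List (List Int) := [] ++ [[(1 : Int) <<< (ki - 1).toNat]]
  let tree := (PySem.List.pyRange 1 ki 1).foldl (fun tree i =>
      tree ++ [(PySem.List.pyRange 0 (i + 1) 1).foldl (fun row j =>
        if j = 0 ∨ j = i then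
          row ++ [PySem.Int.floordiv (PySem.List.pyGetD (PySem.List.pyGetD tree (i - 1) []) 0 0) 2]
        else
          row ++ [PySem.Int.floordiv
            (PySem.List.pyGetD (PySem.List.pyGetD tree (i - 1) []) (j - 1) 0 +
             PySem.List.pyGetD (PySem.List.pyGetD tree (i - 1) []) j 0) 2]) []]) tree
  (PySem.List.pyRange 0 ki 1).foldl (fun sum i =>
    (PySem.List.pyRange 0 (i + 1) 1).foldl (fun sum j =>
      sum + PySem.List.pyGetD (PySem.List.pyGetD basetree i []) j 0 *
            PySem.List.pyGetD (PySem.List.pyGetD tree i []) j 0) sum) 0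

-- ===== PORT B =====
def math_tree_alt (basetree : List (List Int)) (ki : Int) : Int :=
  let base : Int := (1 : Int) <<< (ki - 1).toNat
  (PySem.List.pyRange 0 ki 1).foldl (fun total i =>
    let w := base >>> i.toNat
    ((PySem.List.pyRange 0 (i + 1) 1).foldl (fun (st : Int × Int) j =>
        (st.1 + PySem.List.pyGetD (PySem.List.pyGetD basetree i []) j 0 * st.2 * w,
         PySem.Int.floordiv (st.2 * (i - j)) (j + 1))) (total, 1)).1) 0

-- ===== PRECONDITION & SPEC =====
-- Pre_ excludes exactly the inputs where the Python A raises: ki <= 0 (ValueError on the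
-- negative shift) and a basetree too short for the ki x (i+1) triangular read (IndexError).
def Pre_math_tree (basetree : List (List Int)) (ki : Int) : Prop :=
  1 ≤ ki ∧ ki ≤ (basetree.length : Int) ∧
    ∀ i ∈ List.range ki.toNat, i < (basetree.getD i []).length
instance (basetree : List (List Int)) (ki : Int) : Decidable (Pre_math_tree basetree ki) := by
  unfold Pre_math_tree; infer_instance
def pvWitness_math_tree : List (List Int) × Int := ([[1], [2, 3]], 2)

def Spec_math_tree (basetree : List (List Int)) (ki : Int) (out : Int) : Prop := out = math_tree_alt basetree ki
instance (basetree : List (List Int)) (ki : Int) (out : Int) : Decidable (Spec_math_tree basetree ki out) := by unfold Spec_math_tree; infer_instance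

-- ===== CLAIM (what is proved, stated in full; the proofs are below) =====
def Claim_equal_math_tree : Prop := ∀ (basetree : List (List Int)) (ki : Int), Dom_math_tree basetree ki → Pre_math_tree basetree ki → Spec_math_tree basetree ki (math_tree basetree ki)

-- ===== LEMMAS AND PROOFS =====

-- the (i, j) entry of basetree as both ports read it
def pvCell (basetree : List (List Int)) (i j : Nat) : Int :=
  PySem.List.pyGetD (PySem.List.pyGetD basetree (i : Int) []) (j : Int) 0

-- row i of A's weight table, for n = ki.toNat
def pvWrow (n i : Nat) : List Int :=
  (List.range (i + 1)).map (fun j => (Nat.choose i j : Int) * 2 ^ (n - 1 - i))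

-- the common value of both ports (n = ki.toNat)
def pvRef (basetree : List (List Int)) (n : Nat) : Int :=
  ((List.range n).map (fun i =>
    ((List.range (i + 1)).map (fun j =>
      pvCell basetree i j * (Nat.choose i j : Int) * 2 ^ (n - 1 - i))).sum)).sum

theorem pv_floordiv_mul_two (x : Int) : PySem.Int.floordiv (x * 2) 2 = x := by
  rw [PySem.Int.floordiv_eq_ediv_of_pos (by omega)]
  exact Int.mul_ediv_cancel _ (by omega)

theorem pv_shift_one (k : Nat) : (1 : Int) <<< k = 2 ^ k := by
  simp [Int.shiftLeft_eq]

theorem pv_shift_right (a b : Nat) (h : b ≤ a) : ((2 : Int) ^ a) >>> b = 2 ^ (a - b) := by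
  rw [Int.shiftRight_eq_div_pow, ← pow_sub_mul_pow (2 : Int) h]
  exact Int.mul_ediv_cancel _ (by positivity)

-- one pass of A's row-building loop, over the already characterised table
theorem pv_row_eq (ki : Int) (m : Nat) (hm : 1 ≤ m) (hle : ((m : Nat) : Int) + 1 ≤ ki) :
    ((PySem.List.pyRange 0 ((m : Int) + 1) 1).foldl (fun row j =>
        if j = 0 ∨ j = (m : Int) then
          row ++ [PySem.Int.floordiv
            (PySem.List.pyGetD (PySem.List.pyGetD ((List.range m).map (pvWrow ki.toNat)) ((m : Int) - 1) []) 0 0) 2]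
        else
          row ++ [PySem.Int.floordiv
            (PySem.List.pyGetD (PySem.List.pyGetD ((List.range m).map (pvWrow ki.toNat)) ((m : Int) - 1) []) (j - 1) 0 +
             PySem.List.pyGetD (PySem.List.pyGetD ((List.range m).map (pvWrow ki.toNat)) ((m : Int) - 1) []) j 0) 2]) [])
    = pvWrow ki.toNat m := by
  have hprev : PySem.List.pyGetD ((List.range m).map (pvWrow ki.toNat)) ((m : Int) - 1) []
      = pvWrow ki.toNat (m - 1) := by
    rw [show (m : Int) - 1 = ((m - 1 : Nat) : Int) by omega, PySem.List.pyGetD_natCast,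
      PySem.List.getD_map_range _ _ _ _ (by omega)]
  rw [hprev]
  have hsplit : (fun (row : List Int) (j : Int) =>
      if j = 0 ∨ j = (m : Int) then
        row ++ [PySem.Int.floordiv (PySem.List.pyGetD (pvWrow ki.toNat (m - 1)) 0 0) 2]
      else
        row ++ [PySem.Int.floordiv
          (PySem.List.pyGetD (pvWrow ki.toNat (m - 1)) (j - 1) 0 +
           PySem.List.pyGetD (pvWrow ki.toNat (m - 1)) j 0) 2])
    = (fun row j => row ++ [if j = 0 ∨ j = (m : Int) then
        PySem.Int.floordiv (PySem.List.pyGetD (pvWrow ki.toNat (m - 1)) 0 0) 2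
      else
        PySem.Int.floordiv
          (PySem.List.pyGetD (pvWrow ki.toNat (m - 1)) (j - 1) 0 +
           PySem.List.pyGetD (pvWrow ki.toNat (m - 1)) j 0) 2]) := by
    funext row j; split <;> rfl
  rw [hsplit, PySem.List.foldl_append_singleton_eq_map,
    show (m : Int) + 1 = ((m + 1 : Nat) : Int) by push_cast; ring,
    PySem.List.pyRange_zero_natCast, List.map_map, List.nil_append]
  conv_rhs => rw [pvWrow]
  apply List.map_congr_left
  intro j hj
  have hjm : j < m + 1 := List.mem_range.mp hj
  have hexp : ki.toNat - 1 - (m - 1) = (ki.toNat - 1 - m) + 1 := by omega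
  have hfirst : PySem.List.pyGetD (pvWrow ki.toNat (m - 1)) 0 0
      = (Nat.choose (m - 1) 0 : Int) * 2 ^ (ki.toNat - 1 - (m - 1)) := by
    rw [pvWrow, PySem.List.pyGetD_zero, PySem.List.getD_map_range _ _ _ _ (by omega)]
  simp only [Function.comp_apply]
  by_cases h0 : j = 0 ∨ j = m
  · rw [if_pos (by rcases h0 with h | h <;> subst h <;> simp), hfirst, Nat.choose_zero_right, hexp,
      pow_succ, Nat.cast_one, one_mul, pv_floordiv_mul_two]
    rcases h0 with h | h <;> subst h <;> simp
  · rw [if_neg (by push Not at h0 ⊢; constructor <;> [exact_mod_cast h0.1; exact_mod_cast h0.2])]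
    push Not at h0
    obtain ⟨j', rfl⟩ : ∃ j', j = j' + 1 := ⟨j - 1, by omega⟩
    obtain ⟨m', rfl⟩ : ∃ m', m = m' + 1 := ⟨m - 1, by omega⟩
    have hj'm : j' + 1 < m' + 1 := by omega
    have hg1 : PySem.List.pyGetD (pvWrow ki.toNat (m' + 1 - 1)) (((j' + 1 : Nat) : Int) - 1) 0
        = (Nat.choose m' j' : Int) * 2 ^ (ki.toNat - 1 - m') := by
      rw [show ((j' + 1 : Nat) : Int) - 1 = ((j' : Nat) : Int) by push_cast; ring, pvWrow,
        PySem.List.pyGetD_natCast, PySem.List.getD_map_range _ _ _ _ (by omega)]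
      simp
    have hg2 : PySem.List.pyGetD (pvWrow ki.toNat (m' + 1 - 1)) ((j' + 1 : Nat) : Int) 0
        = (Nat.choose m' (j' + 1) : Int) * 2 ^ (ki.toNat - 1 - m') := by
      rw [pvWrow, PySem.List.pyGetD_natCast, PySem.List.getD_map_range _ _ _ _ (by omega)]
      simp
    rw [hg1, hg2, ← add_mul,
      show (Nat.choose m' j' : Int) + (Nat.choose m' (j' + 1) : Int)
         = ((Nat.choose (m' + 1) (j' + 1) : Nat) : Int) by rw [Nat.choose_succ_succ]; push_cast; ring,
      show ki.toNat - 1 - m' = (ki.toNat - 1 - (m' + 1)) + 1 by omega,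
      pow_succ, ← mul_assoc, pv_floordiv_mul_two]

-- A's table after folding the build loop up to m equals the binomial rows
theorem pv_build_eq (ki : Int) (hki : 1 ≤ ki) :
    ∀ m : Nat, 1 ≤ m → (m : Int) ≤ ki →
      ((PySem.List.pyRange 1 (m : Int) 1).foldl (fun tree i =>
        tree ++ [(PySem.List.pyRange 0 (i + 1) 1).foldl (fun row j =>
          if j = 0 ∨ j = i then
            row ++ [PySem.Int.floordiv (PySem.List.pyGetD (PySem.List.pyGetD tree (i - 1) []) 0 0) 2]
          else
            row ++ [PySem.Int.floordiv
              (PySem.List.pyGetD (PySem.List.pyGetD tree (i - 1) []) (j - 1) 0 +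
               PySem.List.pyGetD (PySem.List.pyGetD tree (i - 1) []) j 0) 2]) []])
        ([] ++ [[(1 : Int) <<< (ki - 1).toNat]]))
      = (List.range m).map (pvWrow ki.toNat) := by
  intro m hm
  induction m, hm using Nat.le_induction with
  | base =>
    intro _
    rw [show ((1 : Nat) : Int) = (1 : Int) by norm_num, PySem.List.pyRange_one_eq_nil le_rfl]
    simp only [List.foldl_nil, List.nil_append]
    rw [pv_shift_one, show (ki - 1).toNat = ki.toNat - 1 by omega]
    simp [pvWrow]
  | succ m hm ih =>
    intro hle
    have hle' : (m : Int) + 1 ≤ ki := by push_cast at hle; omega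
    rw [show ((m + 1 : Nat) : Int) = (m : Int) + 1 by push_cast; ring,
      PySem.List.pyRange_one_succ_right (by exact_mod_cast hm), List.foldl_append,
      ih (by omega), List.foldl_cons, List.foldl_nil, List.range_succ, List.map_append]
    rw [pv_row_eq ki m hm hle']
    simp

theorem pv_wrow_get (n i j : Nat) (hj : j < i + 1) :
    PySem.List.pyGetD (pvWrow n i) ((j : Nat) : Int) 0
      = (Nat.choose i j : Int) * 2 ^ (n - 1 - i) := by
  rw [pvWrow, PySem.List.pyGetD_natCast, PySem.List.getD_map_range _ _ _ _ hj]

-- A's summation loop over one (characterised) row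
theorem pv_A_inner (basetree : List (List Int)) (n iN : Nat) (hiN : iN < n) (s : Int) :
    ((PySem.List.pyRange 0 ((iN : Int) + 1) 1).foldl (fun s j =>
        s + PySem.List.pyGetD (PySem.List.pyGetD basetree (iN : Int) []) j 0 *
            PySem.List.pyGetD (PySem.List.pyGetD ((List.range n).map (pvWrow n)) (iN : Int) []) j 0) s)
    = s + ((List.range (iN + 1)).map (fun j =>
        pvCell basetree iN j * (Nat.choose iN j : Int) * 2 ^ (n - 1 - iN))).sum := by
  have htree : PySem.List.pyGetD ((List.range n).map (pvWrow n)) (iN : Int) [] = pvWrow n iN := by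
    rw [PySem.List.pyGetD_natCast, PySem.List.getD_map_range _ _ _ _ hiN]
  rw [htree, show (iN : Int) + 1 = ((iN + 1 : Nat) : Int) by push_cast; ring,
    PySem.List.pyRange_zero_natCast, List.foldl_map]
  rw [PySem.List.foldl_congr_mem _ _ (fun s (j : Nat) =>
      s + pvCell basetree iN j * (Nat.choose iN j : Int) * 2 ^ (n - 1 - iN)) s ?_]
  · exact PySem.List.foldl_add _ _ _
  · intro acc j hjmem
    have hj : j < iN + 1 := List.mem_range.mp hjmem
    rw [pv_wrow_get n iN j hj]
    simp only [pvCell]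
    ring

theorem pv_A_eq_ref (basetree : List (List Int)) (ki : Int) (hki : 1 ≤ ki) :
    math_tree basetree ki = pvRef basetree ki.toNat := by
  have hn : ((ki.toNat : Nat) : Int) = ki := by omega
  unfold math_tree
  dsimp only
  have hbuild := pv_build_eq ki hki ki.toNat (by omega) (by omega)
  rw [hn] at hbuild
  rw [hbuild, show PySem.List.pyRange 0 ki 1 = PySem.List.pyRange 0 ((ki.toNat : Nat) : Int) 1 by rw [hn],
    PySem.List.pyRange_zero_natCast, List.foldl_map]
  rw [PySem.List.foldl_congr_mem _ _ (fun s (iN : Nat) =>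
      s + ((List.range (iN + 1)).map (fun j =>
        pvCell basetree iN j * (Nat.choose iN j : Int) * 2 ^ (ki.toNat - 1 - iN))).sum) 0 ?_]
  · rw [PySem.List.foldl_add, zero_add, pvRef]
  · intro acc iN hmem
    exact pv_A_inner basetree ki.toNat iN (List.mem_range.mp hmem) acc

-- B's inner loop: running binomial coefficient, accumulated into the total
theorem pv_inner_eq (basetree : List (List Int)) (iN : Nat) (w : Int) :
    ∀ (k a : Nat) (t : Int), a + k = iN + 1 →
      ((PySem.List.pyRange (a : Int) ((iN : Int) + 1) 1).foldl (fun (st : Int × Int) j =>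
          (st.1 + PySem.List.pyGetD (PySem.List.pyGetD basetree (iN : Int) []) j 0 * st.2 * w,
           PySem.Int.floordiv (st.2 * ((iN : Int) - j)) (j + 1))) (t, (Nat.choose iN a : Int))).1
      = t + ((List.range' a k).map (fun j =>
          pvCell basetree iN j * (Nat.choose iN j : Int) * w)).sum := by
  intro k
  induction k with
  | zero =>
    intro a t ha
    rw [PySem.List.pyRange_one_eq_nil (by omega)]
    simp
  | succ k ih =>
    intro a t ha
    rw [PySem.List.pyRange_one_cons (by exact_mod_cast (by omega : (a : Int) < (iN : Int) + 1))]
    simp only [List.foldl_cons]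
    have hc : PySem.Int.floordiv ((Nat.choose iN a : Int) * ((iN : Int) - (a : Int))) ((a : Int) + 1)
        = (Nat.choose iN (a + 1) : Int) := by
      have h2 : (Nat.choose iN a) * (iN - a) = (Nat.choose iN (a + 1)) * (a + 1) :=
        (Nat.choose_succ_right_eq iN a).symm
      rw [show ((iN : Int) - (a : Int)) = ((iN - a : Nat) : Int) by omega,
        PySem.Int.floordiv_eq_ediv_of_pos (by positivity),
        show ((Nat.choose iN a : Int)) * ((iN - a : Nat) : Int)
           = ((Nat.choose iN (a + 1) : Int)) * (((a : Int)) + 1) by exact_mod_cast h2]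
      exact Int.mul_ediv_cancel _ (by omega)
    rw [hc, show (a : Int) + 1 = ((a + 1 : Nat) : Int) by push_cast; ring,
      ih (a + 1) _ (by omega), List.range'_succ]
    simp only [List.map_cons, List.sum_cons, pvCell]
    ring

theorem pv_B_eq_ref (basetree : List (List Int)) (ki : Int) (hki : 1 ≤ ki) :
    math_tree_alt basetree ki = pvRef basetree ki.toNat := by
  have hn : ((ki.toNat : Nat) : Int) = ki := by omega
  unfold math_tree_alt
  dsimp only
  rw [pv_shift_one, show (ki - 1).toNat = ki.toNat - 1 by omega,
    show PySem.List.pyRange 0 ki 1 = PySem.List.pyRange 0 ((ki.toNat : Nat) : Int) 1 by rw [hn],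
    PySem.List.pyRange_zero_natCast, List.foldl_map]
  rw [PySem.List.foldl_congr_mem _ _ (fun t (iN : Nat) =>
      t + ((List.range (iN + 1)).map (fun j =>
        pvCell basetree iN j * (Nat.choose iN j : Int) * 2 ^ (ki.toNat - 1 - iN))).sum) 0 ?_]
  · rw [PySem.List.foldl_add, zero_add, pvRef]
  · intro t iN hmem
    have hiN := List.mem_range.mp hmem
    dsimp only
    have h := pv_inner_eq basetree iN ((2 : Int) ^ (ki.toNat - 1) >>> iN) (iN + 1) 0 t (by omega)
    rw [Nat.cast_zero, Nat.choose_zero_right, Nat.cast_one] at h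
    rw [Int.toNat_natCast, Int.shiftRight_natCast_right, h, ← List.range_eq_range',
      pv_shift_right (ki.toNat - 1) iN (by omega)]

-- ===== VERDICT (by name: the statement is the Claim_ definition above) =====
theorem math_tree_spec : Claim_equal_math_tree := by
  intro basetree ki _ hpre
  unfold Spec_math_tree
  rw [pv_A_eq_ref basetree ki hpre.1, pv_B_eq_ref basetree ki hpre.1]
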